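-- pv_equiv track=rewrite | github.com/S-Shimotori/nlp100 | Chapter5/40-49/chunks.py | split_sentence_into_chunks
-- ===== SOURCE A (Python) =====
-- def split_sentence_into_chunks(lines):
--     result = []
--     chunk = []
--     for line in lines:
--         if line.startswith('* '):
--             if len(chunk) != 0:
--                 result.append(chunk)
--             chunk = [line]
--         else:
--             chunk.append(line)
--     if len(chunk) != 0:
--         result.append(chunk)
--     return result
-- ===== SOURCE B (Python) =====
-- def split_sentence_into_chunks(lines):
--     lines = list(lines)
--     n = len(lines)
--     result = []
--     i = 0
--     while i < n:
--         j = i + 1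
--         while j < n and not lines[j].startswith('* '):
--             j += 1
--         result.append(lines[i:j])
--         i = j
--     return result
-- ===== Notes on version B (the rewrite author's own statement) =====
-- stated objective: alternative
-- what changed: Replaces A's accumulate-and-flush pass (grow a chunk, flush it at each '* ' marker and at the end) with a two-pointer scan over the materialized list: find the next marker index j and emit the slice lines[i:j] directly.
import Mathlib
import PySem

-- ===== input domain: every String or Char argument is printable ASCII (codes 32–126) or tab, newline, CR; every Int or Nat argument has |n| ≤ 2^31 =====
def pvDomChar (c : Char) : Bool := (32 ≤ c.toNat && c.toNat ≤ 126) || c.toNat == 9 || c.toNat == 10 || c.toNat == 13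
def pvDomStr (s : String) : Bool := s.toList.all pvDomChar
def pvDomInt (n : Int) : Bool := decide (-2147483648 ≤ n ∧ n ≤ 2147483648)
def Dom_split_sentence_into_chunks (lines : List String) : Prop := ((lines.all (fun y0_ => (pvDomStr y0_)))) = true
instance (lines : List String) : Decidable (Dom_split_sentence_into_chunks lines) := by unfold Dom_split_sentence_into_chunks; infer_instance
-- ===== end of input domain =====

-- B replaces A's accumulate-and-flush pass with a two-pointer scan that finds the
-- next '* ' marker index and emits each chunk as a slice (objective: alternative).

-- ===== PORT A =====
-- A's for-loop over the lines, with state (result, chunk).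
def pvLoopA (result : List (List String)) (chunk : List String) :
    List String → (List (List String)) × List String
  | [] => (result, chunk)
  | line :: rest =>
    if PySem.Str.startswith line "* " then
      pvLoopA (if chunk.length ≠ 0 then result ++ [chunk] else result) [line] rest
    else
      pvLoopA result (chunk ++ [line]) rest

def split_sentence_into_chunks (lines : List String) : List (List String) :=
  let rc := pvLoopA [] [] lines
  if rc.2.length ≠ 0 then rc.1 ++ [rc.2] else rc.1

-- ===== PORT B =====
-- inner while loop: advance j while j < n and lines[j] does not start with '* '
-- (lines[j] is in range here, so the access is ported as a guarded getElem).
def pvFindJ (lines : List String) (j : Nat) : Nat :=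
  if h : j < lines.length then
    if ¬ PySem.Str.startswith lines[j] "* " then pvFindJ lines (j + 1) else j
  else j
termination_by lines.length - j

theorem pvFindJ_ge (lines : List String) (j : Nat) : j ≤ pvFindJ lines j := by
  unfold pvFindJ
  split
  case isTrue h =>
    split
    · have := pvFindJ_ge lines (j + 1); omega
    · exact Nat.le_refl _
  case isFalse => exact Nat.le_refl _
termination_by lines.length - j
decreasing_by
  omega

-- outer while loop over the write pointer i
def pvLoopB (lines : List String) (result : List (List String)) (i : Nat) :
    List (List String) :=
  if h : i < lines.length then
    let j := pvFindJ lines (i + 1)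
    pvLoopB lines (result ++ [PySem.List.slice lines (some (i : Int)) (some (j : Int))]) j
  else result
termination_by lines.length - i
decreasing_by
  have := pvFindJ_ge lines (i + 1); omega

def split_sentence_into_chunks_alt (lines : List String) : List (List String) :=
  pvLoopB lines [] 0

-- ===== PRECONDITION & SPEC =====
def Spec_split_sentence_into_chunks (lines : List String) (out : List (List String)) : Prop := out = split_sentence_into_chunks_alt lines
instance (lines : List String) (out : List (List String)) : Decidable (Spec_split_sentence_into_chunks lines out) := by unfold Spec_split_sentence_into_chunks; infer_instance

-- ===== CLAIM (what is proved, stated in full; the proofs are below) =====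
def Claim_equal_split_sentence_into_chunks : Prop := ∀ (lines : List String), Dom_split_sentence_into_chunks lines → Spec_split_sentence_into_chunks lines (split_sentence_into_chunks lines)

-- ===== LEMMAS AND PROOFS =====

-- 'line is not a chunk marker', the predicate both loops branch on
def pvNM (l : String) : Bool := ¬ PySem.Str.startswith l "* "

-- the common recursive characterisation: a chunk is the current line followed by
-- the non-marker lines up to the next marker
def pvChunks : List String → List (List String)
  | [] => []
  | x :: ls => (x :: ls.takeWhile pvNM) :: pvChunks (ls.dropWhile pvNM)
termination_by l => l.length
decreasing_by
  have := List.length_dropWhile_le pvNM ls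
  simp; omega

theorem pvChunks_nil : pvChunks [] = [] := by rw [pvChunks.eq_def]

theorem pvChunks_cons (x : String) (ls : List String) :
    pvChunks (x :: ls) = (x :: ls.takeWhile pvNM) :: pvChunks (ls.dropWhile pvNM) := by
  rw [pvChunks.eq_def]

-- the final flush of A, named so the ports' results can be rewritten
def pvFinish (rc : (List (List String)) × List String) : List (List String) :=
  if rc.2.length ≠ 0 then rc.1 ++ [rc.2] else rc.1

theorem pvFinish_eq (lines : List String) :
    split_sentence_into_chunks lines = pvFinish (pvLoopA [] [] lines) := rfl

theorem pvTake_takeWhile {α : Type} (p : α → Bool) (l : List α) :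
    l.take (l.takeWhile p).length = l.takeWhile p := by
  induction l with
  | nil => simp
  | cons x xs ih =>
    by_cases h : p x <;> simp [h, ih]

theorem pvDrop_takeWhile {α : Type} (p : α → Bool) (l : List α) :
    l.drop (l.takeWhile p).length = l.dropWhile p := by
  induction l with
  | nil => simp
  | cons x xs ih =>
    by_cases h : p x <;> simp [h, ih]

theorem pvFindJ_spec (lines : List String) (j : Nat) :
    pvFindJ lines j = j + ((lines.drop j).takeWhile pvNM).length := by
  unfold pvFindJ
  split
  · rename_i h
    have hd : lines.drop j = lines[j] :: lines.drop (j + 1) :=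
      List.drop_eq_getElem_cons h
    split
    · rename_i hm
      rw [pvFindJ_spec lines (j + 1), hd, List.takeWhile_cons]
      have hs : PySem.Chars.startswith lines[j].toList ['*', ' '] = false := by
        simpa using hm
      have hnm : pvNM lines[j] = true := by simp [pvNM, hs]
      rw [hnm]
      simp; omega
    · rename_i hm
      have hs : PySem.Chars.startswith lines[j].toList ['*', ' '] = true := by
        simpa using hm
      have hnm : pvNM lines[j] = false := by simp [pvNM, hs]
      rw [hd, List.takeWhile_cons, hnm]
      simp
  · rename_i h
    rw [List.drop_eq_nil_of_le (by omega)]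
    simp
termination_by lines.length - j
decreasing_by
  rename_i h _; omega

theorem pvLoopB_spec (lines : List String) (result : List (List String)) (i : Nat) :
    pvLoopB lines result i = result ++ pvChunks (lines.drop i) := by
  unfold pvLoopB
  split
  · rename_i h
    have hd : lines.drop i = lines[i] :: lines.drop (i + 1) :=
      List.drop_eq_getElem_cons h
    have hj : pvFindJ lines (i + 1) = i + 1 + ((lines.drop (i + 1)).takeWhile pvNM).length :=
      pvFindJ_spec lines (i + 1)
    rw [pvLoopB_spec]
    have hslice : PySem.List.slice lines (some (i : Int)) (some ((pvFindJ lines (i + 1) : Nat) : Int))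
        = lines[i] :: (lines.drop (i + 1)).takeWhile pvNM := by
      rw [PySem.List.slice_natCast, hj, hd]
      have : i + 1 + ((lines.drop (i + 1)).takeWhile pvNM).length - i
          = ((lines.drop (i + 1)).takeWhile pvNM).length + 1 := by omega
      rw [this, List.take_succ_cons, pvTake_takeWhile]
    have hdropj : lines.drop (pvFindJ lines (i + 1)) = (lines.drop (i + 1)).dropWhile pvNM := by
      rw [hj, ← List.drop_drop, pvDrop_takeWhile]
    rw [hslice, hdropj, hd, pvChunks_cons]
    simp
  · rename_i h
    rw [List.drop_eq_nil_of_le (by omega), pvChunks_nil]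
    simp
termination_by lines.length - i
decreasing_by
  have := pvFindJ_ge lines (i + 1); omega

-- A-side invariant: a nonempty pending chunk absorbs the next non-marker lines
theorem pvLoopA_spec (lines : List String) (result : List (List String))
    (chunk : List String) (hne : chunk ≠ []) :
    pvFinish (pvLoopA result chunk lines)
    = result ++ (chunk ++ lines.takeWhile pvNM) :: pvChunks (lines.dropWhile pvNM) := by
  induction lines generalizing result chunk with
  | nil => simp [pvLoopA, pvFinish, pvChunks_nil, hne]
  | cons line rest ih =>
    by_cases hm : PySem.Str.startswith line "* "
    · have hs : PySem.Chars.startswith line.toList ['*', ' '] = true := by simpa using hm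
      have hnm : pvNM line = false := by simp [pvNM, hs]
      have hlen : chunk.length ≠ 0 := by simpa [List.length_eq_zero_iff] using hne
      rw [show pvLoopA result chunk (line :: rest) = pvLoopA (result ++ [chunk]) [line] rest
            from by simp [pvLoopA, hs, hlen]]
      rw [ih (result ++ [chunk]) [line] (by simp)]
      simp [hnm, pvChunks_cons]
    · have hs : PySem.Chars.startswith line.toList ['*', ' '] = false := by simpa using hm
      have hnm : pvNM line = true := by simp [pvNM, hs]
      rw [show pvLoopA result chunk (line :: rest) = pvLoopA result (chunk ++ [line]) rest
            from by simp [pvLoopA, hs]]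
      rw [ih result (chunk ++ [line]) (by simp)]
      simp [hnm]

-- ===== VERDICT (by name: the statement is the Claim_ definition above) =====
theorem split_sentence_into_chunks_spec : Claim_equal_split_sentence_into_chunks := by
  intro lines _
  unfold Spec_split_sentence_into_chunks split_sentence_into_chunks_alt
  rw [pvLoopB_spec, pvFinish_eq]
  simp only [List.drop_zero, List.nil_append]
  cases lines with
  | nil => simp [pvLoopA, pvFinish, pvChunks_nil]
  | cons x ls =>
    have h : pvLoopA [] [] (x :: ls) = pvLoopA [] [x] ls := by
      by_cases hm : PySem.Str.startswith x "* " <;> simp [pvLoopA]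
    rw [h, pvLoopA_spec ls [] [x] (by simp), pvChunks_cons]
    simp
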